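-- pv_equiv track=rewrite | github.com/mannyfin/aioget | search_svc/search.py | _encode_keyword_combos
-- ===== SOURCE A (Python) =====
-- from itertools import combinations
--
-- def _encode_keyword_combos(keywords: list, degree: int = 1):
--     """
--     Generates tuples for combinations of keywords. See here for more information on how the degree works:
--     https://en.wikipedia.org/wiki/Binomial_coefficient Most times we want to use degree=1. However, for research
--     purposes we may want to test out different keyword combinations.
--
--     Args:
--         keywords (list): list of keywords. If provided from config file, provide self.keywords[language] to get
--         the list
--         degree (int): Degree of combinations (the k in n_choose_k from Probability & Statistics
--
--     Returns:
--         Generator tuples of form (comb(keywords,1), keyword)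
--
--     Examples:
--         k = ['a', 'b', 'c', 'd']
--
--         Input:
--             combos(k,2)
--
--         Output:
--             ("a"%20"b", 'a b')
--             ("a"%20"c", 'a c')
--             ("a"%20"d", 'a d')
--             ("b"%20"c", 'b c')
--             ("b"%20"d", 'b d')
--             ("c"%20"d", 'c d')
--     """
--
--     quote = '%22'
--     if len(keywords) == 0:
--         yield '%20', '%20'
--
--     for x in list(combinations(keywords, degree)):
--         if not x:
--             # for empty string
--             yield '%20', '%20'
--         # yield ('"' + '"%20"'.join(x) + '"', ' '.join(x))
--         yield quote + '%22%20%22'.join(x) + quote, ' '.join(x)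
-- ===== SOURCE B (Python) =====
-- def _encode_keyword_combos(keywords: list, degree: int = 1):
--     # Hand-written take/skip recursion over the keyword list instead of
--     # itertools.combinations; emits combinations in index-lexicographic order.
--     if not keywords:
--         yield '%20', '%20'
--
--     def pick(rest, chosen):
--         if len(chosen) == degree:
--             yield '%22' + '%22%20%22'.join(chosen) + '%22', ' '.join(chosen)
--             return
--         if rest:
--             yield from pick(rest[1:], chosen + [rest[0]])
--             yield from pick(rest[1:], chosen)
--
--     yield from pick(keywords, [])
-- ===== Notes on version B (the rewrite author's own statement) =====
-- stated objective: alternative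
-- what changed: Replaces the itertools.combinations call with a hand-written take/skip recursion over the keyword list that threads the chosen prefix and emits the encoded pair at the base case, in the same index-lexicographic order; Pre_ excludes degree < 0, on which A raises ValueError.
-- intended difference: On degree = 0 the empty combination accidentally trips A's 'if not x' branch (meant for the no-keywords case) and then falls through, so A yields an extra ('%20','%20') pair before ('%22%22',''); B yields just ('%22%22',''), the plain encoding of the empty combination, which is the intended value. — e.g. on _encode_keyword_combos(["a"], 0): A returns [("%20", "%20"), ("%22%22", "")], B returns [("%22%22", "")]
import Mathlib
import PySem

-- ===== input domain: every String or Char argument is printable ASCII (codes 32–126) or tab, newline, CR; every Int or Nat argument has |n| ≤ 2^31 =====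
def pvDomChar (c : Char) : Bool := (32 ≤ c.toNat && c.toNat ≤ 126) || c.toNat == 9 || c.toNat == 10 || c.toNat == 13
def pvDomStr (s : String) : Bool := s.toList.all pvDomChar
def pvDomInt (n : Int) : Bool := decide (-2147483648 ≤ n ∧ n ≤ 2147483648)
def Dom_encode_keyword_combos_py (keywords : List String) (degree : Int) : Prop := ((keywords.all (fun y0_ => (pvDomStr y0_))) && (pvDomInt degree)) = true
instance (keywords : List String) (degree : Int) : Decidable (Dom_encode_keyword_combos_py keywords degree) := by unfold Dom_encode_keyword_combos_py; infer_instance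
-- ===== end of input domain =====

-- B replaces the itertools.combinations call with a take/skip recursion over the keyword
-- list that emits the encoded pair at the base case (objective: alternative, same cost);
-- on degree = 0 B omits A's accidental extra ('%20','%20') pair (stated as D_ below).


-- ===== PORT A =====
-- itertools.combinations(l, k) in its index-lexicographic order (library call, ported as
-- the standard recursive characterisation; exact for k ≥ 0, which Pre_ guarantees)
def pyCombinations (l : List String) (k : Nat) : List (List String) :=
  match k, l with
  | 0, _ => [[]]
  | _ + 1, [] => []
  | k + 1, x :: xs => (pyCombinations xs k).map (x :: ·) ++ pyCombinations xs (k + 1)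

def encode_keyword_combos_py (keywords : List String) (degree : Int) : List (String × String) :=
  (if keywords.length = 0 then [(("%20" : String), ("%20" : String))] else []) ++
    (pyCombinations keywords degree.toNat).flatMap (fun x =>
      (if x.isEmpty then [(("%20" : String), ("%20" : String))] else []) ++
        [("%22" ++ PySem.Str.join "%22%20%22" x ++ "%22", PySem.Str.join " " x)])

-- ===== PORT B =====
def pickB (degree : Int) (rest chosen : List String) : List (String × String) :=
  if (chosen.length : Int) = degree then
    [("%22" ++ PySem.Str.join "%22%20%22" chosen ++ "%22", PySem.Str.join " " chosen)]
  else
    match rest with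
    | [] => []
    | r :: rs => pickB degree rs (chosen ++ [r]) ++ pickB degree rs chosen

def encode_keyword_combos_py_alt (keywords : List String) (degree : Int) : List (String × String) :=
  (if keywords.isEmpty then [(("%20" : String), ("%20" : String))] else []) ++
    pickB degree keywords []

-- ===== PRECONDITION & SPEC =====
-- Pre_ excludes degree < 0, on which Python A raises ValueError (from itertools.combinations).
def Pre_encode_keyword_combos_py (keywords : List String) (degree : Int) : Prop := 0 ≤ degree
instance (keywords : List String) (degree : Int) : Decidable (Pre_encode_keyword_combos_py keywords degree) := by unfold Pre_encode_keyword_combos_py; infer_instance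
def pvWitness_encode_keyword_combos_py : List String × Int := (["a", "b", "c"], 2)

-- On degree = 0 the empty combination accidentally trips A's 'if not x' branch (meant for
-- the no-keywords case) and falls through, so A yields an extra ('%20','%20') pair before
-- ('%22%22',''); B yields just ('%22%22',''), the plain encoding of the empty combination,
-- which is the intended value.
def D_encode_keyword_combos_py (keywords : List String) (degree : Int) : Prop := degree = 0
instance (keywords : List String) (degree : Int) : Decidable (D_encode_keyword_combos_py keywords degree) := by unfold D_encode_keyword_combos_py; infer_instance

def Spec_encode_keyword_combos_py (keywords : List String) (degree : Int) (out : List (String × String)) : Prop := ¬ D_encode_keyword_combos_py keywords degree → out = encode_keyword_combos_py_alt keywords degree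
instance (keywords : List String) (degree : Int) (out : List (String × String)) : Decidable (Spec_encode_keyword_combos_py keywords degree out) := by unfold Spec_encode_keyword_combos_py; infer_instance

def pvDiffWitness_encode_keyword_combos_py : List String × Int := (["a"], 0)
def pvDiffWitnessOut_encode_keyword_combos_py : (List (String × String)) × (List (String × String)) :=
  ([("%20", "%20"), ("%22%22", "")], [("%22%22", "")])

-- ===== CLAIM (what is proved, stated in full; the proofs are below) =====
def Claim_unchanged_encode_keyword_combos_py : Prop := ∀ (keywords : List String) (degree : Int), Dom_encode_keyword_combos_py keywords degree → Pre_encode_keyword_combos_py keywords degree → Spec_encode_keyword_combos_py keywords degree (encode_keyword_combos_py keywords degree)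
def Claim_changed_encode_keyword_combos_py : Prop := Dom_encode_keyword_combos_py (pvDiffWitness_encode_keyword_combos_py.1) (pvDiffWitness_encode_keyword_combos_py.2) ∧ Pre_encode_keyword_combos_py (pvDiffWitness_encode_keyword_combos_py.1) (pvDiffWitness_encode_keyword_combos_py.2) ∧ D_encode_keyword_combos_py (pvDiffWitness_encode_keyword_combos_py.1) (pvDiffWitness_encode_keyword_combos_py.2) ∧ encode_keyword_combos_py (pvDiffWitness_encode_keyword_combos_py.1) (pvDiffWitness_encode_keyword_combos_py.2) = pvDiffWitnessOut_encode_keyword_combos_py.1 ∧ encode_keyword_combos_py_alt (pvDiffWitness_encode_keyword_combos_py.1) (pvDiffWitness_encode_keyword_combos_py.2) = pvDiffWitnessOut_encode_keyword_combos_py.2 ∧ pvDiffWitnessOut_encode_keyword_combos_py.1 ≠ pvDiffWitnessOut_encode_keyword_combos_py.2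
def Claim_exact_encode_keyword_combos_py : Prop := ∀ (keywords : List String) (degree : Int), Dom_encode_keyword_combos_py keywords degree → Pre_encode_keyword_combos_py keywords degree → D_encode_keyword_combos_py keywords degree → encode_keyword_combos_py keywords degree ≠ encode_keyword_combos_py_alt keywords degree

-- ===== LEMMAS AND PROOFS =====

-- the single pair B emits for one completed combination
def pvEmit (x : List String) : List (String × String) :=
  [("%22" ++ PySem.Str.join "%22%20%22" x ++ "%22", PySem.Str.join " " x)]

lemma pickB_base (d : Int) (rest chosen : List String) (hc : (chosen.length : Int) = d) :
    pickB d rest chosen = pvEmit chosen := by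
  rw [pickB.eq_def, if_pos hc]; rfl

lemma pickB_eq (d : Nat) : ∀ (rest chosen : List String), chosen.length ≤ d →
    pickB (d : Int) rest chosen =
      (pyCombinations rest (d - chosen.length)).flatMap (fun x => pvEmit (chosen ++ x)) := by
  intro rest
  induction rest with
  | nil =>
    intro chosen h
    by_cases hc : chosen.length = d
    · rw [pickB_base _ _ _ (by exact_mod_cast hc), hc, Nat.sub_self]
      simp [pyCombinations]
    · have hlt : chosen.length < d := lt_of_le_of_ne h hc
      have hd : d - chosen.length = (d - chosen.length - 1) + 1 := by omega
      rw [pickB.eq_def, if_neg (by exact_mod_cast hc), hd]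
      simp [pyCombinations]
  | cons r rs ih =>
    intro chosen h
    by_cases hc : chosen.length = d
    · rw [pickB_base _ _ _ (by exact_mod_cast hc), hc, Nat.sub_self]
      simp [pyCombinations]
    · have hlt : chosen.length < d := lt_of_le_of_ne h hc
      have hd : d - chosen.length = (d - chosen.length - 1) + 1 := by omega
      rw [pickB.eq_def, if_neg (by exact_mod_cast hc)]
      show pickB _ rs (chosen ++ [r]) ++ pickB _ rs chosen = _
      rw [ih (chosen ++ [r]) (by simp; omega), ih chosen h, hd, pyCombinations]
      have h1 : d - (chosen ++ [r]).length = d - chosen.length - 1 := by simp; omega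
      rw [h1, List.flatMap_append, List.flatMap_map]
      simp

lemma comb_length (k : Nat) : ∀ (l x : List String), x ∈ pyCombinations l k → x.length = k := by
  induction k with
  | zero => intro l x hx; simp [pyCombinations] at hx; simp [hx]
  | succ k ih =>
    intro l
    induction l with
    | nil => intro x hx; simp [pyCombinations] at hx
    | cons a l ihl =>
      intro x hx
      simp only [pyCombinations, List.mem_append, List.mem_map] at hx
      rcases hx with ⟨y, hy, rfl⟩ | hx
      · simp [ih l y hy]
      · exact ihl x hx

-- ===== VERDICT (by name: the statement is the Claim_ definition above) =====
theorem encode_keyword_combos_py_spec : Claim_unchanged_encode_keyword_combos_py := by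
  intro keywords degree _ hpre hD
  unfold encode_keyword_combos_py encode_keyword_combos_py_alt
  have hdeg : ((degree.toNat : Int)) = degree := Int.toNat_of_nonneg hpre
  have hB : pickB degree keywords [] =
      (pyCombinations keywords degree.toNat).flatMap (fun x => pvEmit ([] ++ x)) := by
    rw [← hdeg]
    exact pickB_eq degree.toNat keywords [] (Nat.zero_le _)
  rw [hB]
  have hk : degree.toNat ≠ 0 := by
    intro h0
    exact hD (by unfold D_encode_keyword_combos_py; omega)
  have hA : ∀ x ∈ pyCombinations keywords degree.toNat,
      (if x.isEmpty then [(("%20" : String), ("%20" : String))] else []) ++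
        [("%22" ++ PySem.Str.join "%22%20%22" x ++ "%22", PySem.Str.join " " x)] = pvEmit x := by
    intro x hx
    have := comb_length degree.toNat keywords x hx
    have hne : x ≠ [] := by intro h; rw [h] at this; simp at this; omega
    simp [pvEmit, hne]
  rw [List.flatMap_congr hA]
  simp [List.isEmpty_iff, List.length_eq_zero_iff]

theorem encode_keyword_combos_py_changed : Claim_changed_encode_keyword_combos_py := by
  unfold Claim_changed_encode_keyword_combos_py; decide

theorem encode_keyword_combos_py_tight : Claim_exact_encode_keyword_combos_py := by
  intro keywords degree _ _ hD
  have h0 : degree = 0 := hD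
  subst h0
  intro h
  have hlen := congrArg List.length h
  simp [encode_keyword_combos_py, encode_keyword_combos_py_alt, pyCombinations,
    pickB_base 0 keywords [] (by simp), pvEmit,
    List.isEmpty_iff, List.length_eq_zero_iff] at hlen
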